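-- pv_equiv track=rewrite | github.com/ayushs1803/video-pillar-crop | .github/workflows/video_pillar_crop.py | find_pillars
-- ===== SOURCE A (Python) =====
-- def find_pillars(black_cols_bool):
--     W = len(black_cols_bool)
--     left = 0
--     while left < W and black_cols_bool[left]:
--         left += 1
--     right = 0
--     while right < W and black_cols_bool[W-1-right]:
--         right += 1
--     left = min(left, W//2)
--     right = min(right, W//2)
--     return left, right
-- ===== SOURCE B (Python) =====
-- def find_pillars(black_cols_bool):
--     W = len(black_cols_bool)
--     falses = [i for i, v in enumerate(black_cols_bool) if not v]
--     if falses: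
--         left, right = falses[0], W - 1 - falses[-1]
--     else:
--         left = right = W
--     h = W // 2
--     return min(left, h), min(right, h)
-- ===== Notes on version B (the rewrite author's own statement) =====
-- stated objective: alternative
-- what changed: Replaces the two inward early-terminating while-loop scans with a single enumerate pass collecting non-black column indices, reading the answer off the first and last such index.
import Mathlib
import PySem

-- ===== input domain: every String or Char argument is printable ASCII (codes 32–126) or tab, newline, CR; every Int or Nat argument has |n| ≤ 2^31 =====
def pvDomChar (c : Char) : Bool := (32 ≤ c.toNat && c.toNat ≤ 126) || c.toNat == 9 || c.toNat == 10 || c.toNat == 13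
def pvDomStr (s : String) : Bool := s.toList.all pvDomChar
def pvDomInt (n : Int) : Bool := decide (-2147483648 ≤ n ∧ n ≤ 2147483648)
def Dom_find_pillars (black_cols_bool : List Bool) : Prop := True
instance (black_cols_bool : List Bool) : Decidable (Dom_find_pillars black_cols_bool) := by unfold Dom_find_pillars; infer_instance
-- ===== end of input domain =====

-- B replaces A's two inward early-terminating while-loop scans with a single enumerate pass collecting the
-- non-black column indices and reading the answer off the first and last such index (alternative decomposition, same cost).

-- ===== PORT A =====
-- 'while left < W and black_cols_bool[left]: left += 1'; the index is in range whenever it is read, so getD is exact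
def pvLoopL (xs : List Bool) (W : Nat) (i : Nat) : Nat :=
  if i < W ∧ xs.getD i false then pvLoopL xs W (i + 1) else i
termination_by W - i
decreasing_by omega

-- 'while right < W and black_cols_bool[W-1-right]: right += 1'; same in-range argument
def pvLoopR (xs : List Bool) (W : Nat) (i : Nat) : Nat :=
  if i < W ∧ xs.getD (W - 1 - i) false then pvLoopR xs W (i + 1) else i
termination_by W - i
decreasing_by omega

def find_pillars (black_cols_bool : List Bool) : Int × Int :=
  let W := black_cols_bool.length
  let left : Int := pvLoopL black_cols_bool W 0
  let right : Int := pvLoopR black_cols_bool W 0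
  let h := PySem.Int.floordiv (W : Int) 2
  (min left h, min right h)

-- ===== PORT B =====
-- 'falses = [i for i, v in enumerate(black_cols_bool) if not v]'; 'if falses: … else left = right = W'
def find_pillars_alt (black_cols_bool : List Bool) : Int × Int :=
  let W : Int := black_cols_bool.length
  let falses := (PySem.List.enumerate black_cols_bool 0).filterMap
      (fun p => if p.2 then none else some p.1)
  let lr : Int × Int :=
    match falses.head?, falses.getLast? with
    | some f, some l => (f, W - 1 - l)
    | _, _ => (W, W)
  let h := PySem.Int.floordiv W 2
  (min lr.1 h, min lr.2 h)

-- ===== PRECONDITION & SPEC =====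
def Spec_find_pillars (black_cols_bool : List Bool) (out : Int × Int) : Prop := out = find_pillars_alt black_cols_bool
instance (black_cols_bool : List Bool) (out : Int × Int) : Decidable (Spec_find_pillars black_cols_bool out) := by unfold Spec_find_pillars; infer_instance

-- ===== CLAIM (what is proved, stated in full; the proofs are below) =====
def Claim_equal_find_pillars : Prop := ∀ (black_cols_bool : List Bool), Dom_find_pillars black_cols_bool → Spec_find_pillars black_cols_bool (find_pillars black_cols_bool)

-- ===== LEMMAS AND PROOFS =====

-- A's left scan counts the leading run of trues
theorem pvLoopL_eq (xs : List Bool) (i : Nat) (h : i ≤ xs.length) :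
    pvLoopL xs xs.length i = i + ((xs.drop i).takeWhile id).length := by
  fun_induction pvLoopL xs xs.length i with
  | case1 i hc ih =>
    obtain ⟨hlt, hget⟩ := hc
    rw [List.drop_eq_getElem_cons hlt]
    have hx : xs[i] = true := by simpa [List.getD, List.getElem?_eq_getElem hlt] using hget
    rw [hx]
    simp only [List.takeWhile_cons, id]
    rw [ih (by omega)]
    simp; omega
  | case2 i hc =>
    rcases Nat.lt_or_ge i xs.length with hlt | hge
    · have hget : xs.getD i false = false := by
        cases hb : xs.getD i false
        · rfl
        · exact absurd ⟨hlt, hb⟩ hc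
      have hx : xs[i] = false := by simpa [List.getD, List.getElem?_eq_getElem hlt] using hget
      rw [List.drop_eq_getElem_cons hlt, hx]
      simp
    · simp [List.drop_eq_nil_of_le hge]

theorem pvGetD_rev (xs : List Bool) (i : Nat) (h : i < xs.length) :
    xs.reverse.getD i false = xs.getD (xs.length - 1 - i) false := by
  simp [List.getD, List.getElem?_reverse h]

-- A's right scan is the left scan on the reversed list
theorem pvLoopR_eq_rev (xs : List Bool) (i : Nat) :
    pvLoopR xs xs.length i = pvLoopL xs.reverse xs.length i := by
  fun_induction pvLoopR xs xs.length i with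
  | case1 i hc ih =>
    rw [pvLoopL]
    rw [if_pos ⟨hc.1, by rw [pvGetD_rev xs i hc.1]; exact hc.2⟩]
    exact ih
  | case2 i hc =>
    rw [pvLoopL, if_neg]
    intro ⟨hlt, hget⟩
    exact hc ⟨hlt, by rwa [pvGetD_rev xs i hlt] at hget⟩

-- B's list of non-black indices (with offset s), the term find_pillars_alt builds
def pvFalses (xs : List Bool) (s : Int) : List Int :=
  (PySem.List.enumerate xs s).filterMap (fun p => if p.2 then none else some p.1)

theorem pvFalses_cons (b : Bool) (xs : List Bool) (s : Int) :
    pvFalses (b :: xs) s = (if b then [] else [s]) ++ pvFalses xs (s + 1) := by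
  cases b <;> simp [pvFalses, PySem.List.enumerate_cons]

-- first non-black index (default W) = length of the leading run of trues
theorem pvFalses_head (xs : List Bool) (s : Int) :
    (pvFalses xs s).head?.getD (s + xs.length) = s + ((xs.takeWhile id).length : Int) := by
  induction xs generalizing s with
  | nil => simp [pvFalses]
  | cons b t ih =>
    rw [pvFalses_cons]
    cases b
    · simp
    · have h1 := ih (s + 1)
      rw [List.takeWhile_cons]
      simp only [if_pos trivial, List.nil_append, List.length_cons]
      push_cast
      rw [show s + ((t.length : Int) + 1) = s + 1 + t.length by ring, h1]
      simp
      ring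

theorem pvFalses_append_singleton (xs : List Bool) (b : Bool) :
    pvFalses (xs ++ [b]) 0 = pvFalses xs 0 ++ (if b then [] else [(xs.length : Int)]) := by
  cases b <;>
    simp [pvFalses, PySem.List.enumerate_append, PySem.List.enumerate_cons, List.filterMap_append]

-- W-1-(last non-black index) (default W) = length of the trailing run of trues
theorem pvFalses_last (xs : List Bool) :
    (match (pvFalses xs 0).getLast? with
      | some l => (xs.length : Int) - 1 - l
      | none => (xs.length : Int)) = ((xs.reverse.takeWhile id).length : Int) := by
  induction xs using List.reverseRecOn with
  | nil => simp [pvFalses]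
  | append_singleton xs b ih =>
    rw [pvFalses_append_singleton]
    cases b
    · simp
    · simp only [if_pos trivial, List.append_nil, List.reverse_append, List.reverse_singleton,
        List.singleton_append, List.takeWhile_cons, id, List.length_append, List.length_cons,
        List.length_nil]
      cases hL : (pvFalses xs 0).getLast? with
      | none => rw [hL] at ih; simp at ih ⊢; omega
      | some l => rw [hL] at ih; simp at ih ⊢; linarith [ih]

-- find_pillars_alt restated through pvFalses (definitional)
theorem pvAlt_def (xs : List Bool) : find_pillars_alt xs =
    (let W : Int := xs.length
     let lr : Int × Int :=
       match (pvFalses xs 0).head?, (pvFalses xs 0).getLast? with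
       | some f, some l => (f, W - 1 - l)
       | _, _ => (W, W)
     let h := PySem.Int.floordiv W 2
     (min lr.1 h, min lr.2 h)) := rfl

theorem pvFinal (xs : List Bool) : find_pillars xs = find_pillars_alt xs := by
  rw [pvAlt_def]
  simp only [find_pillars]
  have hA1 : (pvLoopL xs xs.length 0 : Int) = ((xs.takeWhile id).length : Int) := by
    rw [pvLoopL_eq xs 0 (by omega)]; simp
  have hA2 : (pvLoopR xs xs.length 0 : Int) = ((xs.reverse.takeWhile id).length : Int) := by
    rw [pvLoopR_eq_rev]
    have h2 := pvLoopL_eq xs.reverse 0 (by omega)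
    simp at h2
    exact_mod_cast h2
  have hB1 := pvFalses_head xs 0
  have hB2 := pvFalses_last xs
  cases hF : pvFalses xs 0 with
  | nil =>
    rw [hF] at hB1 hB2
    simp at hB1 hB2
    rw [hA1, hA2, ← hB1, ← hB2]
    rfl
  | cons f rest =>
    have hne : f :: rest ≠ [] := by simp
    have hlast := List.getLast?_eq_some_getLast hne
    rw [hF, hlast] at hB2
    rw [hF] at hB1
    simp only [List.head?_cons, hlast]
    simp at hB1 hB2
    rw [hA1, hA2, ← hB1, ← hB2]

-- ===== VERDICT (by name: the statement is the Claim_ definition above) =====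
theorem find_pillars_spec : Claim_equal_find_pillars := by
  intro xs _
  exact pvFinal xs
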